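-- pv_equiv track=rewrite | github.com/seoyyyy/Algorithm | src/programmers/level1/recommend_job_84325/recommend_job.py | solution
-- ===== SOURCE A (Python) =====
-- def solution(table, languages, preference):
--     jobs = {}
--     for job in table:
--         l = job.split(' ')
--         sum = 0
--         for i in range(len(languages)):
--             if languages[i] in l:
--                 sum += (len(l) - l.index(languages[i])) * preference[i]
--         # 점수 총합을 담을 dict
--         jobs[l[0]] = sum
--
--     m = max(jobs.values())
--     s = []
--     for key, value in jobs.items():
--         if m == value:
--             s.append(key)
--     s.sort()
--
--     answer = s[0]
--     return answer
-- ===== SOURCE B (Python) =====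
-- def solution(table, languages, preference):
--     pref = {}
--     for w, p in zip(languages, preference):
--         pref[w] = pref.get(w, 0) + p
--     jobs = {}
--     for job in table:
--         words = job.split(' ')
--         n = len(words)
--         score = 0
--         for i, w in enumerate(words):
--             if w not in words[:i]:
--                 score += (n - i) * pref.get(w, 0)
--         jobs[words[0]] = score
--     return min(jobs, key=lambda name: (-jobs[name], name))
-- ===== Notes on version B (the rewrite author's own statement) =====
-- stated objective: faster
-- what changed: B pre-sums preferences per language into a dict and scores each job in a single pass over its words, removing A's per-language membership scan and .index rescan of the word list, and replaces A's max-value pass + tie-collection + sort with one composite-key min over the score dict.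
import Mathlib
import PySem

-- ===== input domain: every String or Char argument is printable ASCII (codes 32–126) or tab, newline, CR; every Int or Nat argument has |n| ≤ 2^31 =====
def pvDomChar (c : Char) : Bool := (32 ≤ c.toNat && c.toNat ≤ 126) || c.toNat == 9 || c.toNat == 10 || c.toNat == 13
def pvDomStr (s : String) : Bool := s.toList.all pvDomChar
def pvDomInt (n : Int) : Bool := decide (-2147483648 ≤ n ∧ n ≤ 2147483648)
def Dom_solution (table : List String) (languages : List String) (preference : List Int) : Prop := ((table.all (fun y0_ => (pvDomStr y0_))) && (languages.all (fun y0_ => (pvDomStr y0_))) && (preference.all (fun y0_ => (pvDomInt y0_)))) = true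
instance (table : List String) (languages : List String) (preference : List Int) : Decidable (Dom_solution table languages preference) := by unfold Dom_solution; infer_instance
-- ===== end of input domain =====

-- B scores each job in one pass over its words against a pre-summed preference dict instead of
-- scanning the word list once per language, and replaces A's max-value pass + tie-collection + sort
-- with a single composite-key min over the score dict (objective: faster; measurably so).

-- job.split(' ') (sep is nonempty, so split? is always some)
def pySplitSp (job : String) : List String := (PySem.Str.split? job " ").getD []

-- ===== PORT A =====
def solution (table : List String) (languages : List String) (preference : List Int) : String :=
  let jobs := table.foldl (fun jobs job =>
    let l := pySplitSp job
    let s := (PySem.List.pyRange 0 (languages.length : Int) 1).foldl (fun s i =>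
      let lang := PySem.List.pyGetD languages i ""
      if lang ∈ l then
        s + ((l.length : Int) - (((PySem.List.index? l lang).getD 0 : Nat) : Int)) * PySem.List.pyGetD preference i 0
      else s) (0 : Int)
    jobs.insert (PySem.List.pyGetD l 0 "") s) PySem.Dict.empty
  let m := (PySem.List.max? jobs.values (fun v => v)).getD 0
  let s := jobs.items.foldl (fun s kv => if m = kv.2 then s ++ [kv.1] else s) ([] : List String)
  PySem.List.pyGetD (PySem.List.sorted s (fun x => x) false) 0 ""

-- ===== PORT B =====
def solution_alt (table : List String) (languages : List String) (preference : List Int) : String :=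
  let pref := (languages.zip preference).foldl
    (fun d wp => d.insert wp.1 (d.getD wp.1 0 + wp.2)) PySem.Dict.empty
  let jobs := table.foldl (fun jobs job =>
    let words := pySplitSp job
    let n : Int := words.length
    let score := (PySem.List.enumerate words 0).foldl (fun s iw =>
      if iw.2 ∈ PySem.List.slice words none (some iw.1) then s
      else s + (n - iw.1) * pref.getD iw.2 0) (0 : Int)
    jobs.insert (PySem.List.pyGetD words 0 "") score) PySem.Dict.empty
  (PySem.List.min2? jobs.keys (fun name => -(jobs.getD name 0)) (fun name => name)).getD ""

-- ===== PRECONDITION & SPEC =====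
-- Pre_ excludes exactly the inputs where Python A raises: an empty table (max() of an empty dict,
-- ValueError) and inputs where some language whose index is ≥ len(preference) occurs in a job's
-- word list (IndexError on preference[i]).
def Pre_solution (table : List String) (languages : List String) (preference : List Int) : Prop :=
  table ≠ [] ∧ ∀ lang ∈ languages.drop preference.length, ∀ job ∈ table, lang ∉ pySplitSp job
instance (table : List String) (languages : List String) (preference : List Int) : Decidable (Pre_solution table languages preference) := by unfold Pre_solution; infer_instance

def pvWitness_solution : List String × List String × List Int :=
  (["python 3 java", "java 1"], ["python", "java"], [4, 2])

def Spec_solution (table : List String) (languages : List String) (preference : List Int) (out : String) : Prop := out = solution_alt table languages preference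
instance (table : List String) (languages : List String) (preference : List Int) (out : String) : Decidable (Spec_solution table languages preference out) := by unfold Spec_solution; infer_instance

-- ===== CLAIM (what is proved, stated in full; the proofs are below) =====
def Claim_equal_solution : Prop := ∀ (table : List String) (languages : List String) (preference : List Int), Dom_solution table languages preference → Pre_solution table languages preference → Spec_solution table languages preference (solution table languages preference)

-- ===== LEMMAS AND PROOFS =====

-- A's contribution of one (language, preference) pair to a job's score
def contribA (l : List String) (w : String) (p : Int) : Int :=
  if w ∈ l then ((l.length : Int) - (((PySem.List.index? l w).getD 0 : Nat) : Int)) * p else 0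

-- B's per-word term, as a function of the preference dict
def termB (l : List String) (d : PySem.Dict String Int) (iw : Int × String) : Int :=
  if iw.2 ∈ PySem.List.slice l none (some iw.1) then 0
  else ((l.length : Int) - iw.1) * d.getD iw.2 0

lemma contribA_zero (l : List String) (w : String) : contribA l w 0 = 0 := by
  simp [contribA]

-- with the empty dict every word scores 0
lemma termB_empty_sum (l : List String) :
    ((PySem.List.enumerate l 0).map (termB l PySem.Dict.empty)).sum = 0 := by
  apply List.sum_eq_zero
  intro x hx
  obtain ⟨iw, _, rfl⟩ := List.mem_map.mp hx
  simp [termB, PySem.Dict.getD_empty]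

-- inserting (w, old+p) into the dict adds exactly A's contribution of (w, p)
lemma termB_insert_sum (l : List String) (d : PySem.Dict String Int) (w : String) (p : Int) :
    ((PySem.List.enumerate l 0).map (termB l (d.insert w (d.getD w 0 + p)))).sum
      = ((PySem.List.enumerate l 0).map (termB l d)).sum + contribA l w p := by
  by_cases hw : w ∈ l
  · -- split l at the first occurrence of w
    obtain ⟨k, hk⟩ := Option.isSome_iff_exists.mp ((PySem.List.index?_isSome_iff l w).mpr hw)
    obtain ⟨pre, suf, hsplit, hlen, hwpre⟩ := (PySem.List.index?_eq_some_iff l w k).mp hk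
    have hcontrib : contribA l w p = ((l.length : Int) - (k : Int)) * p := by
      rw [contribA, if_pos hw, hk]
      rfl
    have henum : PySem.List.enumerate l 0
        = PySem.List.enumerate pre 0 ++ ((pre.length : Int), w) :: PySem.List.enumerate suf ((pre.length : Int) + 1) := by
      rw [hsplit, PySem.List.enumerate_append, PySem.List.enumerate_cons, zero_add]
    rw [henum, List.map_append, List.map_cons, List.sum_append, List.sum_cons,
        List.map_append, List.map_cons, List.sum_append, List.sum_cons]
    -- pre terms are unchanged
    have hpre : (PySem.List.enumerate pre 0).map (termB l (d.insert w (d.getD w 0 + p)))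
        = (PySem.List.enumerate pre 0).map (termB l d) := by
      apply List.map_congr_left
      intro iw hiw
      obtain ⟨j, hj, rfl⟩ := (PySem.List.mem_enumerate_iff pre 0 iw).mp hiw
      have hne : pre[j] ≠ w := fun h => hwpre (h ▸ pre.getElem_mem hj)
      simp only [termB, PySem.Dict.getD_insert, if_neg hne]
    -- suf terms are unchanged
    have hsuf : (PySem.List.enumerate suf ((pre.length : Int) + 1)).map (termB l (d.insert w (d.getD w 0 + p)))
        = (PySem.List.enumerate suf ((pre.length : Int) + 1)).map (termB l d) := by
      apply List.map_congr_left
      intro iw hiw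
      obtain ⟨j, hj, rfl⟩ := (PySem.List.mem_enumerate_iff suf _ iw).mp hiw
      by_cases hiw2 : suf[j] = w
      · -- both terms are 0: w already occurred at position pre.length < the index
        have hmem : suf[j] ∈ PySem.List.slice l none (some ((pre.length : Int) + 1 + (j : Int))) := by
          rw [PySem.List.slice_to _ (by positivity),
              show ((pre.length : Int) + 1 + (j : Int)).toNat = pre.length + (1 + j) by omega,
              hsplit, List.take_append, hiw2]
          refine List.mem_append_right _ ?_
          rw [show pre.length + (1 + j) - pre.length = j + 1 by omega, List.take_succ_cons]
          exact List.mem_cons_self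
        simp only [termB, if_pos hmem]
      · simp only [termB, PySem.Dict.getD_insert, if_neg hiw2]
    rw [hpre, hsuf, hcontrib]
    -- middle term picks up exactly the contribution
    have hnotin : ¬ w ∈ PySem.List.slice l none (some (pre.length : Int)) := by
      rw [PySem.List.slice_to _ (by positivity), Int.toNat_natCast, hsplit, List.take_left]
      exact hwpre
    simp only [termB, if_neg hnotin, PySem.Dict.getD_insert, ← hlen]
    push_cast
    ring
  · -- w does not occur: nothing changes and the contribution is 0
    rw [contribA, if_neg hw, add_zero]
    apply congrArg
    apply List.map_congr_left
    intro iw hiw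
    obtain ⟨j, hj, rfl⟩ := (PySem.List.mem_enumerate_iff l 0 iw).mp hiw
    have hne : l[j] ≠ w := fun h => hw (h ▸ l.getElem_mem hj)
    simp only [termB, PySem.Dict.getD_insert, if_neg hne]


lemma termB_fold_sum (l : List String) : ∀ (pairs : List (String × Int)) (d : PySem.Dict String Int),
    ((PySem.List.enumerate l 0).map (termB l
        (pairs.foldl (fun d wp => d.insert wp.1 (d.getD wp.1 0 + wp.2)) d))).sum
      = ((PySem.List.enumerate l 0).map (termB l d)).sum
        + (pairs.map (fun wp => contribA l wp.1 wp.2)).sum := by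
  intro pairs
  induction pairs with
  | nil => intro d; simp
  | cons wp rest ih =>
    intro d
    rw [List.foldl_cons, ih, termB_insert_sum, List.map_cons, List.sum_cons]
    ring

-- A's range-indexed sum collapses to a sum over the zipped pairs
lemma range_sum_eq_zip_sum (l : List String) : ∀ (langs : List String) (prefs : List Int),
    ((List.range langs.length).map
        (fun k => contribA l (langs.getD k "") (prefs.getD k 0))).sum
      = ((langs.zip prefs).map (fun wp => contribA l wp.1 wp.2)).sum := by
  intro langs
  induction langs with
  | nil => intro prefs; simp
  | cons a t ih =>
    intro prefs
    rw [List.length_cons, List.range_succ_eq_map, List.map_cons, List.sum_cons, List.map_map]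
    cases prefs with
    | nil =>
      simp only [List.zip_nil_right, List.map_nil, List.sum_nil]
      rw [show (List.getD [] 0 (0 : Int)) = 0 from rfl, contribA_zero, zero_add]
      apply List.sum_eq_zero
      intro x hx
      obtain ⟨k, _, rfl⟩ := List.mem_map.mp hx
      exact contribA_zero l _
    | cons q qt =>
      rw [List.zip_cons_cons, List.map_cons, List.sum_cons]
      simp only [List.getD_cons_zero]
      have hmap : (List.map ((fun k => contribA l (List.getD (a :: t) k "") (List.getD (q :: qt) k 0)) ∘ Nat.succ)
            (List.range t.length))
          = List.map (fun k => contribA l (List.getD t k "") (List.getD qt k 0)) (List.range t.length) := by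
        apply List.map_congr_left
        intro k _
        simp [Function.comp]
      rw [hmap, ih qt]

-- per-job score equality between the two ports
lemma score_eq (l : List String) (langs : List String) (prefs : List Int) :
    (PySem.List.pyRange 0 (langs.length : Int) 1).foldl (fun s i =>
        let lang := PySem.List.pyGetD langs i ""
        if lang ∈ l then
          s + ((l.length : Int) - (((PySem.List.index? l lang).getD 0 : Nat) : Int)) * PySem.List.pyGetD prefs i 0
        else s) (0 : Int)
      = (PySem.List.enumerate l 0).foldl (fun s iw =>
          if iw.2 ∈ PySem.List.slice l none (some iw.1) then s
          else s + ((l.length : Int) - iw.1) *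
            ((langs.zip prefs).foldl (fun d wp => d.insert wp.1 (d.getD wp.1 0 + wp.2))
              PySem.Dict.empty).getD iw.2 0) (0 : Int) := by
  -- LHS: index loop → sum over range → sum over zipped pairs
  have hL : (PySem.List.pyRange 0 (langs.length : Int) 1).foldl (fun s i =>
        let lang := PySem.List.pyGetD langs i ""
        if lang ∈ l then
          s + ((l.length : Int) - (((PySem.List.index? l lang).getD 0 : Nat) : Int)) * PySem.List.pyGetD prefs i 0
        else s) (0 : Int)
      = ((List.range langs.length).map
          (fun k => contribA l (langs.getD k "") (prefs.getD k 0))).sum := by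
    rw [PySem.List.pyRange_zero_nat, List.foldl_map]
    have hb : (fun (s : Int) (k : Nat) =>
          let lang := PySem.List.pyGetD langs (k : Int) ""
          if lang ∈ l then
            s + ((l.length : Int) - (((PySem.List.index? l lang).getD 0 : Nat) : Int)) * PySem.List.pyGetD prefs (k : Int) 0
          else s)
        = (fun (s : Int) (k : Nat) => s + contribA l (langs.getD k "") (prefs.getD k 0)) := by
      funext s k
      simp only [PySem.List.pyGetD_natCast, contribA]
      split
      · rfl
      · rw [add_zero]
    rw [hb, PySem.List.foldl_add, zero_add]
  -- RHS: word loop → sum of termB over the enumerate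
  have hR : (PySem.List.enumerate l 0).foldl (fun s iw =>
          if iw.2 ∈ PySem.List.slice l none (some iw.1) then s
          else s + ((l.length : Int) - iw.1) *
            ((langs.zip prefs).foldl (fun d wp => d.insert wp.1 (d.getD wp.1 0 + wp.2))
              PySem.Dict.empty).getD iw.2 0) (0 : Int)
      = ((PySem.List.enumerate l 0).map (termB l
          ((langs.zip prefs).foldl (fun d wp => d.insert wp.1 (d.getD wp.1 0 + wp.2))
            PySem.Dict.empty))).sum := by
    have hb : (fun (s : Int) (iw : Int × String) =>
          if iw.2 ∈ PySem.List.slice l none (some iw.1) then s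
          else s + ((l.length : Int) - iw.1) *
            ((langs.zip prefs).foldl (fun d wp => d.insert wp.1 (d.getD wp.1 0 + wp.2))
              PySem.Dict.empty).getD iw.2 0)
        = (fun (s : Int) (iw : Int × String) => s + termB l
            ((langs.zip prefs).foldl (fun d wp => d.insert wp.1 (d.getD wp.1 0 + wp.2))
              PySem.Dict.empty) iw) := by
      funext s iw
      simp only [termB]
      split
      · rw [add_zero]
      · rfl
    rw [hb, PySem.List.foldl_add, zero_add]
  rw [hL, hR, range_sum_eq_zip_sum, termB_fold_sum, termB_empty_sum, zero_add]


-- == selection: head of sorted argmax list = first lexicographic-min under (-score, name) ==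

-- the strict "is strictly better" relation min2? uses (k1 = -(f ·), k2 = id)
def BeatsP (f : String → Int) (x m : String) : Prop := f m < f x ∨ (¬ f x < f m ∧ x < m)
lemma not_beats_iff (f : String → Int) (a b : String) :
    ¬ BeatsP f a b ↔ f a ≤ f b ∧ (f a < f b ∨ b ≤ a) := by
  unfold BeatsP
  push Not
  constructor
  · rintro ⟨h1, h2⟩
    refine ⟨h1, ?_⟩
    rcases lt_or_eq_of_le h1 with h | h
    · exact Or.inl h
    · refine Or.inr (h2 ?_)
      rw [h]
  · rintro ⟨h1, h2⟩
    refine ⟨h1, fun hge => ?_⟩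
    rcases h2 with h | h
    · exact absurd h (not_lt.mpr hge)
    · exact h

lemma notbeats_trans (f : String → Int) {a b c : String}
    (h1 : ¬ BeatsP f a b) (h2 : ¬ BeatsP f b c) : ¬ BeatsP f a c := by
  rw [not_beats_iff] at *
  obtain ⟨hab, hab'⟩ := h1
  obtain ⟨hbc, hbc'⟩ := h2
  refine ⟨le_trans hab hbc, ?_⟩
  rcases hab' with h | h
  · exact Or.inl (lt_of_lt_of_le h hbc)
  · rcases hbc' with h' | h'
    · exact Or.inl (lt_of_le_of_lt hab h')
    · exact Or.inr (le_trans h' h)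

lemma beats_cond_iff (f : String → Int) (x m : String) :
    ((decide ((fun s => -(f s)) x < (fun s => -(f s)) m) ||
      (!decide ((fun s => -(f s)) m < (fun s => -(f s)) x) && decide ((fun s => s) x < (fun s => s) m))) = true)
      ↔ BeatsP f x m := by
  simp only [Bool.or_eq_true, Bool.and_eq_true, Bool.not_eq_true', decide_eq_true_iff,
    decide_eq_false_iff_not, neg_lt_neg_iff, BeatsP]

lemma not_beats_self (f : String → Int) (m : String) : ¬ BeatsP f m m := by
  rw [not_beats_iff]
  exact ⟨le_refl _, Or.inr (le_refl _)⟩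

def min2Step (f : String → Int) (acc : Option String) (x : String) : Option String :=
  match acc with
  | none => some x
  | some mm => if (decide ((fun s => -(f s)) x < (fun s => -(f s)) mm) ||
      (!decide ((fun s => -(f s)) mm < (fun s => -(f s)) x) && decide ((fun s => s) x < (fun s => s) mm))) = true
      then some x else some mm

lemma min2?_eq_foldl (f : String → Int) (xs : List String) :
    PySem.List.min2? xs (fun s => -(f s)) (fun s => s) = xs.foldl (min2Step f) none := by
  unfold PySem.List.min2? min2Step
  congr 1
  funext acc x
  cases acc <;> rfl

lemma min2Step_some (f : String → Int) (m x : String) :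
    min2Step f (some m) x = if (decide ((fun s => -(f s)) x < (fun s => -(f s)) m) ||
      (!decide ((fun s => -(f s)) m < (fun s => -(f s)) x) && decide ((fun s => s) x < (fun s => s) m))) = true
      then some x else some m := rfl

lemma min2_go (f : String → Int) : ∀ (xs : List String) (m : String),
    ∃ z, (xs.foldl (min2Step f) (some m)) = some z ∧
      z ∈ m :: xs ∧ ∀ y ∈ m :: xs, ¬ BeatsP f y z := by
  intro xs
  induction xs with
  | nil =>
    intro m
    refine ⟨m, rfl, List.mem_singleton.mpr rfl, ?_⟩
    intro y hy
    rw [List.mem_singleton] at hy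
    subst hy
    exact not_beats_self f y
  | cons x rest ih =>
    intro m
    rw [List.foldl_cons]
    by_cases hb : BeatsP f x m
    · rw [min2Step_some, if_pos ((beats_cond_iff f x m).mpr hb)]
      obtain ⟨z, hz, hzm, hall⟩ := ih x
      refine ⟨z, hz, ?_, ?_⟩
      · rcases List.mem_cons.mp hzm with h | h
        · exact h ▸ List.mem_cons_of_mem _ List.mem_cons_self
        · exact List.mem_cons_of_mem _ (List.mem_cons_of_mem _ h)
      · intro y hy
        rcases List.mem_cons.mp hy with rfl | hy'
        · have hmx : ¬ BeatsP f y x := by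
            rw [not_beats_iff]
            rcases hb with h | ⟨h1, h2⟩
            · exact ⟨le_of_lt h, Or.inl h⟩
            · exact ⟨not_lt.mp h1, Or.inr (le_of_lt h2)⟩
          exact notbeats_trans f hmx (hall x List.mem_cons_self)
        · exact hall y hy'
    · rw [min2Step_some, if_neg (fun h => hb ((beats_cond_iff f x m).mp h))]
      obtain ⟨z, hz, hzm, hall⟩ := ih m
      refine ⟨z, hz, ?_, ?_⟩
      · rcases List.mem_cons.mp hzm with h | h
        · exact h ▸ List.mem_cons_self
        · exact List.mem_cons_of_mem _ (List.mem_cons_of_mem _ h)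
      · intro y hy
        rcases List.mem_cons.mp hy with rfl | hy'
        · exact hall y List.mem_cons_self
        · rcases List.mem_cons.mp hy' with rfl | hy''
          · exact notbeats_trans f hb (hall m List.mem_cons_self)
          · exact hall y (List.mem_cons_of_mem _ hy'')

lemma min2_spec (f : String → Int) (xs : List String) (hne : xs ≠ []) :
    ∃ z, PySem.List.min2? xs (fun s => -(f s)) (fun s => s) = some z ∧
      z ∈ xs ∧ ∀ y ∈ xs, ¬ BeatsP f y z := by
  match xs with
  | [] => exact absurd rfl hne
  | x :: rest =>
    obtain ⟨z, hz, hzm, hall⟩ := min2_go f rest x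
    refine ⟨z, ?_, hzm, hall⟩
    rw [min2?_eq_foldl, List.foldl_cons]
    exact hz

-- a nonempty fold of inserts has nonempty items
lemma items_foldl_insert_ne_nil {β : Type} (key : β → String) (f : PySem.Dict String Int → β → Int) :
    ∀ (l : List β) (d : PySem.Dict String Int), (d.items ≠ [] ∨ l ≠ []) →
      (l.foldl (fun d x => d.insert (key x) (f d x)) d).items ≠ [] := by
  intro l
  induction l with
  | nil =>
    intro d h
    rcases h with h | h
    · exact h
    · exact absurd rfl h
  | cons x t ih =>
    intro d _
    rw [List.foldl_cons]
    apply ih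
    left
    rw [PySem.Dict.items_insert]
    by_cases hc : d.contains (key x) = true
    · rw [if_pos hc]
      intro hmap
      rw [List.map_eq_nil_iff] at hmap
      have hk := (PySem.Dict.contains_iff_mem_keys _ _).mp hc
      rw [PySem.Dict.keys, hmap] at hk
      simp at hk
    · rw [if_neg hc]
      simp

-- the selection halves agree on any nonempty dict with distinct keys
lemma foldl_tie (m : Int) : ∀ (l : List (String × Int)) (acc : List String),
    l.foldl (fun s kv => if m = kv.2 then s ++ [kv.1] else s) acc
      = acc ++ (l.filter (fun kv => decide (m = kv.2))).map (fun kv => kv.1) := by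
  intro l
  induction l with
  | nil => simp
  | cons kv t ih =>
    intro acc
    rw [List.foldl_cons]
    by_cases h : m = kv.2
    · rw [if_pos h, ih, List.filter_cons_of_pos (by simpa using h), List.map_cons]
      simp
    · rw [if_neg h, ih, List.filter_cons_of_neg (by simpa using h)]

lemma select_eq (d : PySem.Dict String Int) (hnd : d.keys.Nodup) (hne : d.items ≠ []) :
    PySem.List.pyGetD (PySem.List.sorted
        (d.items.foldl (fun s kv =>
            if (PySem.List.max? d.values (fun v => v)).getD 0 = kv.2 then s ++ [kv.1] else s)
          ([] : List String)) (fun x => x) false) 0 ""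
      = (PySem.List.min2? d.keys (fun name => -(d.getD name 0)) (fun name => name)).getD "" := by
  set f : String → Int := fun k => d.getD k 0 with hf
  have hkeysne : d.keys ≠ [] := by
    intro h
    apply hne
    have : d.items.map (·.1) = [] := by
      rw [← PySem.Dict.keys] at *; exact h
    exact List.map_eq_nil_iff.mp this
  have hvalsne : d.values ≠ [] := by
    intro h
    apply hne
    have : d.items.map (·.2) = [] := by
      rw [← PySem.Dict.values] at *; exact h
    exact List.map_eq_nil_iff.mp this
  -- the max value
  obtain ⟨m, hm⟩ : ∃ m, PySem.List.max? d.values (fun v => v) = some m := by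
    rcases h : PySem.List.max? d.values (fun v => v) with _ | m
    · exact absurd ((PySem.List.max?_eq_none_iff _ _).mp h) hvalsne
    · exact ⟨m, rfl⟩
  have hmmax : ∀ v ∈ d.values, v ≤ m := fun v hv => PySem.List.max?_isMax hm v hv
  have hmmem : m ∈ d.values := PySem.List.max?_mem hm
  have hM : (PySem.List.max? d.values (fun v => v)).getD 0 = m := by rw [hm]; rfl
  rw [hM]
  -- values and items through keys
  have hitems := PySem.Dict.items_eq_map_keys d hnd (0 : Int)
  have hvalues : d.values = d.keys.map f := by
    rw [PySem.Dict.values, hitems, List.map_map]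
    rfl
  -- the tie list s
  rw [foldl_tie]
  simp only [List.nil_append]
  have hs : ((d.items.filter (fun kv : String × Int => decide (m = kv.2))).map (fun kv : String × Int => kv.1))
      = d.keys.filter (fun k => decide (m = f k)) := by
    rw [hitems, List.filter_map, List.map_map]
    rw [show ((fun kv : String × Int => kv.1) ∘ fun k : String => (k, d.getD k 0)) = fun k : String => k from rfl]
    rw [show ((fun kv : String × Int => decide (m = kv.2)) ∘ fun k : String => (k, d.getD k 0))
        = fun k : String => decide (m = f k) from rfl]
    exact List.map_id' _
  rw [hs]
  -- the tie list is nonempty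
  obtain ⟨kz, hkz, hkzval⟩ : ∃ k ∈ d.keys, f k = m := by
    rw [hvalues] at hmmem
    obtain ⟨k, hk, hkv⟩ := List.mem_map.mp hmmem
    exact ⟨k, hk, hkv⟩
  have hsne : d.keys.filter (fun k => decide (m = f k)) ≠ [] := by
    apply List.ne_nil_of_mem (a := kz)
    rw [List.mem_filter]
    exact ⟨hkz, by simp [hkzval]⟩
  -- head of the sorted tie list
  obtain ⟨z, t, hzt⟩ : ∃ z t, PySem.List.sorted (d.keys.filter (fun k => decide (m = f k))) (fun x => x) false = z :: t := by
    rcases h : PySem.List.sorted (d.keys.filter (fun k => decide (m = f k))) (fun x => x) false with _ | ⟨z, t⟩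
    · exact absurd ((PySem.List.sorted_eq_nil_iff _ _ _).mp h) hsne
    · exact ⟨z, t, rfl⟩
  rw [hzt]
  have hzmem : z ∈ d.keys.filter (fun k => decide (m = f k)) := by
    rw [← PySem.List.mem_sorted _ (fun x : String => x) false, hzt]
    exact List.mem_cons_self
  have hzmin : ∀ y ∈ d.keys.filter (fun k => decide (m = f k)), z ≤ y :=
    PySem.List.key_head_sorted_le _ (fun x : String => x) hzt
  obtain ⟨hzkeys, hzval⟩ := List.mem_filter.mp hzmem
  have hzval : f z = m := (decide_eq_true_iff.mp hzval).symm
  -- B side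
  obtain ⟨z', hz', hz'mem, hz'min⟩ := min2_spec f d.keys hkeysne
  rw [show (PySem.List.min2? d.keys (fun name => -(d.getD name 0)) fun name => name)
      = PySem.List.min2? d.keys (fun s => -(f s)) (fun s => s) from rfl, hz']
  simp only [Option.getD_some]
  -- both are ≤ each other
  have hfle : ∀ y ∈ d.keys, f y ≤ m := by
    intro y hy
    exact hmmax (f y) (hvalues ▸ List.mem_map_of_mem hy)
  have hz'prop := (not_beats_iff f z z').mp (hz'min z hzkeys)
  have hz'valle : f z' ≤ m := hfle z' hz'mem
  have hz'val : f z' = m := le_antisymm hz'valle (hzval ▸ hz'prop.1)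
  have hle1 : z' ≤ z := by
    rcases hz'prop.2 with h | h
    · exact absurd h (not_lt.mpr (by rw [hzval, hz'val]))
    · exact h
  have hle2 : z ≤ z' := by
    apply hzmin
    rw [List.mem_filter]
    exact ⟨hz'mem, by simp [hz'val]⟩
  -- pyGetD on a cons at index 0
  rw [show PySem.List.pyGetD (z :: t) 0 "" = z by
    rw [show (0 : Int) = ((0 : Nat) : Int) from rfl, PySem.List.pyGetD_natCast]
    rfl]
  exact le_antisymm hle2 hle1

-- ===== VERDICT (by name: the statement is the Claim_ definition above) =====
theorem solution_spec : Claim_equal_solution := by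
  intro table languages preference _ hpre
  obtain ⟨htne, -⟩ := hpre
  unfold Spec_solution
  simp only [solution, solution_alt]
  have hjobs : table.foldl (fun jobs job =>
        jobs.insert (PySem.List.pyGetD (pySplitSp job) 0 "")
          ((PySem.List.pyRange 0 (languages.length : Int) 1).foldl (fun s i =>
            let lang := PySem.List.pyGetD languages i ""
            if lang ∈ pySplitSp job then
              s + (((pySplitSp job).length : Int) - (((PySem.List.index? (pySplitSp job) lang).getD 0 : Nat) : Int)) * PySem.List.pyGetD preference i 0
            else s) (0 : Int))) PySem.Dict.empty
      = table.foldl (fun jobs job =>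
        jobs.insert (PySem.List.pyGetD (pySplitSp job) 0 "")
          ((PySem.List.enumerate (pySplitSp job) 0).foldl (fun s iw =>
            if iw.2 ∈ PySem.List.slice (pySplitSp job) none (some iw.1) then s
            else s + (((pySplitSp job).length : Int) - iw.1) *
              ((languages.zip preference).foldl (fun d wp => d.insert wp.1 (d.getD wp.1 0 + wp.2))
                PySem.Dict.empty).getD iw.2 0) (0 : Int))) PySem.Dict.empty := by
    congr 1
    funext jobs job
    exact congrArg _ (score_eq (pySplitSp job) languages preference)
  rw [hjobs]
  exact select_eq _
    (PySem.Dict.nodup_keys_foldl_insert_key table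
      (fun job => PySem.List.pyGetD (pySplitSp job) 0 "") _ PySem.Dict.empty
      (by simp [PySem.Dict.keys_empty]))
    (items_foldl_insert_ne_nil (fun job => PySem.List.pyGetD (pySplitSp job) 0 "") _ table
      PySem.Dict.empty (Or.inr htne))
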